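-- pv_equiv track=rewrite | github.com/canonical/checkbox | providers/sru/bin/dkms_build_validation.py | get_context_lines
-- ===== SOURCE A (Python) =====
-- from typing import Dict, List, Set
--
-- def get_context_lines(log: List[str], line_numbers: Set[int]) -> List[str]:
--     # Create a set with the indexes of the lines to be printed
--     context_lines = set()
--     context = 5
--     n_lines = len(log)
--     for i in line_numbers:
--         min_numbers = max(0, i - context)
--         max_numbers = min(n_lines, i + context + 1)
--         for j in range(min_numbers, max_numbers):
--             context_lines.add(j)
--     return [log[i] for i in sorted(context_lines)]
-- ===== SOURCE B (Python) =====
-- def get_context_lines(log, line_numbers):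
--     # Inverted strategy: one filtered pass over the log, keeping each line
--     # whose index is within 5 of some requested number (checked against a
--     # set of the raw numbers).  No index set, no final sort.
--     wanted = set(line_numbers)
--     return [line for j, line in enumerate(log)
--             if any(j + d in wanted for d in range(-5, 6))]
-- ===== Notes on version B (the rewrite author's own statement) =====
-- stated objective: simpler
-- what changed: Instead of expanding every requested number into an index set and sorting it, B puts the raw numbers in a set once and does a single filtered pass over enumerate(log), keeping each line whose index is within 5 of some requested number; ascending order is automatic.
import Mathlib
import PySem

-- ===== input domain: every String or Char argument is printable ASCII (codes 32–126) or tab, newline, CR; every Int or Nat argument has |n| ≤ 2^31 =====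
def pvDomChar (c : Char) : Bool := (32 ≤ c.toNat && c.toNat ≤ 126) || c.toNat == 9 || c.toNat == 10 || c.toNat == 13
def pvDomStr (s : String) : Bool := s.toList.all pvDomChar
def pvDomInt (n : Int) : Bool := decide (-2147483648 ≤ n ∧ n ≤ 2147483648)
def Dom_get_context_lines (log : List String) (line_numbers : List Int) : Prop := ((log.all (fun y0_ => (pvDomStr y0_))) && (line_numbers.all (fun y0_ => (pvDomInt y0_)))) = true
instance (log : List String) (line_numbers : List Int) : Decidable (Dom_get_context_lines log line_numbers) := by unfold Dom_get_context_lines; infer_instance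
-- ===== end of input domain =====

-- B replaces A's set-of-expanded-indices-then-sort with one filtered pass over enumerate(log) against a set of the raw numbers (simpler, same result).

-- ===== PORT A =====
-- log[i] in the final comprehension is always in range, so pyGetD is exact there.
def get_context_lines (log : List String) (line_numbers : List Int) : List String :=
  let context : Int := 5
  let n_lines : Int := PySem.List.len log
  let context_lines : PySem.Set Int :=
    line_numbers.foldl (fun cl i =>
      let min_numbers := max 0 (i - context)
      let max_numbers := min n_lines (i + context + 1)
      (PySem.List.pyRange min_numbers max_numbers 1).foldl (fun cl' j => PySem.Set.add cl' j) cl)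
      PySem.Set.empty
  (PySem.List.sorted context_lines (fun x => x) false).map (fun i => PySem.List.pyGetD log i "")

-- ===== PORT B =====
def get_context_lines_alt (log : List String) (line_numbers : List Int) : List String :=
  let wanted : PySem.Set Int := PySem.Set.ofList line_numbers
  ((PySem.List.enumerate log 0).filter
    (fun p => (PySem.List.pyRange (-5) 6 1).any (fun d => PySem.Set.contains wanted (p.1 + d)))).map
    (fun p => p.2)

-- ===== PRECONDITION & SPEC =====
def Spec_get_context_lines (log : List String) (line_numbers : List Int) (out : List String) : Prop := out = get_context_lines_alt log line_numbers
instance (log : List String) (line_numbers : List Int) (out : List String) : Decidable (Spec_get_context_lines log line_numbers out) := by unfold Spec_get_context_lines; infer_instance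

-- ===== CLAIM (what is proved, stated in full; the proofs are below) =====
def Claim_equal_get_context_lines : Prop := ∀ (log : List String) (line_numbers : List Int), Dom_get_context_lines log line_numbers → Spec_get_context_lines log line_numbers (get_context_lines log line_numbers)

-- ===== LEMMAS AND PROOFS =====

-- the accumulated set, named for the proofs
def pvCtx (n : Int) (nums : List Int) (s : PySem.Set Int) : PySem.Set Int :=
  nums.foldl (fun cl i =>
    (PySem.List.pyRange (max 0 (i - 5)) (min n (i + 5 + 1)) 1).foldl
      (fun cl' j => PySem.Set.add cl' j) cl) s

theorem pvCtx_mem (n : Int) (nums : List Int) (s : PySem.Set Int) (j : Int) :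
    j ∈ pvCtx n nums s ↔ j ∈ s ∨ ∃ i ∈ nums, max 0 (i - 5) ≤ j ∧ j < min n (i + 5 + 1) := by
  induction nums generalizing s with
  | nil => simp [pvCtx]
  | cons i tl ih =>
      simp only [pvCtx, List.foldl_cons] at *
      rw [ih]
      have h := PySem.Set.mem_foldl_add (f := fun x : Int => x)
        (l := PySem.List.pyRange (max 0 (i - 5)) (min n (i + 5 + 1)) 1) (s := s) (y := j)
      simp only [h, PySem.List.mem_pyRange_one, List.mem_cons]
      constructor
      · rintro ((hs | ⟨x, ⟨h1, h2⟩, rfl⟩) | ⟨x, hx, hw⟩)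
        · exact Or.inl hs
        · exact Or.inr ⟨i, Or.inl rfl, h1, h2⟩
        · exact Or.inr ⟨x, Or.inr hx, hw⟩
      · rintro (hs | ⟨x, (rfl | hx), hw⟩)
        · exact Or.inl (Or.inl hs)
        · exact Or.inl (Or.inr ⟨j, ⟨hw.1, hw.2⟩, rfl⟩)
        · exact Or.inr ⟨x, hx, hw⟩

theorem pvCtx_nodup (n : Int) (nums : List Int) (s : PySem.Set Int) (hs : s.Nodup) :
    (pvCtx n nums s).Nodup := by
  induction nums generalizing s with
  | nil => simpa [pvCtx] using hs
  | cons i tl ih =>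
      simp only [pvCtx, List.foldl_cons] at *
      apply ih
      generalize PySem.List.pyRange (max 0 (i - 5)) (min n (i + 5 + 1)) 1 = r
      induction r generalizing s with
      | nil => simpa using hs
      | cons a as ih2 => exact ih2 _ (PySem.Set.nodup_add s a hs)

theorem get_context_lines_eq (log : List String) (nums : List Int) :
    get_context_lines log nums = get_context_lines_alt log nums := by
  have hB : get_context_lines_alt log nums =
      ((PySem.List.pyRange 0 (PySem.List.len log) 1).filter
        (fun j => (PySem.List.pyRange (-5) 6 1).any
          (fun d => PySem.Set.contains (PySem.Set.ofList nums) (j + d)))).map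
        (fun j => PySem.List.pyGetD log j "") := by
    unfold get_context_lines_alt
    rw [PySem.List.enumerate_eq_map_pyRange (d := "")]
    dsimp only
    rw [List.filter_map, List.map_map]
    rfl
  have hA : PySem.List.sorted (pvCtx (PySem.List.len log) nums PySem.Set.empty) (fun x => x) false =
      (PySem.List.pyRange 0 (PySem.List.len log) 1).filter
        (fun j => (PySem.List.pyRange (-5) 6 1).any
          (fun d => PySem.Set.contains (PySem.Set.ofList nums) (j + d))) := by
    apply PySem.List.sorted_eq_of_perm_of_pairwise_lt
    · rw [List.perm_ext_iff_of_nodup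
        (List.Nodup.filter _ (PySem.List.nodup_pyRange_one 0 (PySem.List.len log)))
        (pvCtx_nodup _ _ _ (by simp [PySem.Set.empty]))]
      intro j
      rw [pvCtx_mem, List.mem_filter, PySem.List.mem_pyRange_one]
      simp only [PySem.Set.empty, List.not_mem_nil, false_or, List.any_eq_true,
        PySem.List.mem_pyRange_one, PySem.Set.contains_iff, PySem.Set.mem_ofList]
      constructor
      · rintro ⟨⟨h0, hn⟩, d, ⟨hd1, hd2⟩, hmem⟩
        exact ⟨j + d, hmem, by omega, by omega⟩
      · rintro ⟨i, hi, h1, h2⟩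
        refine ⟨⟨by omega, by omega⟩, i - j, ⟨by omega, by omega⟩, ?_⟩
        have hij : j + (i - j) = i := by ring
        rwa [hij]
    · exact (PySem.List.pairwise_lt_pyRange_one 0 (PySem.List.len log)).filter _
  show (PySem.List.sorted (pvCtx (PySem.List.len log) nums PySem.Set.empty) (fun x => x) false).map
      (fun i => PySem.List.pyGetD log i "") = _
  rw [hA, hB]

-- ===== VERDICT (by name: the statement is the Claim_ definition above) =====
theorem get_context_lines_spec : Claim_equal_get_context_lines := by
  intro log nums _
  exact get_context_lines_eq log nums
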